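-- pv_equiv track=rewrite | github.com/timoreo22/aoc2024 | day15-p1.py | check_move
-- ===== SOURCE A (Python) =====
-- def check_move(robot: tuple[int,int], dire: tuple[int,int], wall_set, box_set) -> bool:
--     px = robot[0] + dire[0]
--     py = robot[1] + dire[1]
--     if (px,py) in wall_set:
--         return False
--     if (px, py) in box_set:
--         if check_move((px,py), dire, wall_set, box_set):
--             box_set.remove((px,py))
--             box_set.add((px + dire[0],py + dire[1]))
--             return True
--         else:
--             return False
--     return True
-- ===== SOURCE B (Python) =====
-- def check_move(robot: tuple[int, int], dire: tuple[int, int], wall_set, box_set) -> bool: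
--     # Closed-form index walk instead of recursion: cell i is robot + i*dire; scan
--     # indices 1..len(box_set)+1 for the first cell that ends the box run, then
--     # shift the whole run at once on success.
--     for i in range(1, len(box_set) + 2):
--         cell = (robot[0] + i * dire[0], robot[1] + i * dire[1])
--         if cell in wall_set or cell not in box_set:
--             break
--     if cell in wall_set:
--         return False
--     for j in range(1, i):
--         box_set.remove((robot[0] + j * dire[0], robot[1] + j * dire[1]))
--     for j in range(1, i):
--         box_set.add((robot[0] + (j + 1) * dire[0], robot[1] + (j + 1) * dire[1]))
--     return True
-- ===== Notes on version B (the rewrite author's own statement) =====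
-- stated objective: alternative
-- what changed: Replaces A's recursion (one stack frame per box, mutating on unwind) with a bounded for-loop over indices i=1..len(box_set)+1 that computes each cell in closed form as robot+i*dire, finds the first cell ending the box run, and shifts the whole run in one batch.
import Mathlib
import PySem

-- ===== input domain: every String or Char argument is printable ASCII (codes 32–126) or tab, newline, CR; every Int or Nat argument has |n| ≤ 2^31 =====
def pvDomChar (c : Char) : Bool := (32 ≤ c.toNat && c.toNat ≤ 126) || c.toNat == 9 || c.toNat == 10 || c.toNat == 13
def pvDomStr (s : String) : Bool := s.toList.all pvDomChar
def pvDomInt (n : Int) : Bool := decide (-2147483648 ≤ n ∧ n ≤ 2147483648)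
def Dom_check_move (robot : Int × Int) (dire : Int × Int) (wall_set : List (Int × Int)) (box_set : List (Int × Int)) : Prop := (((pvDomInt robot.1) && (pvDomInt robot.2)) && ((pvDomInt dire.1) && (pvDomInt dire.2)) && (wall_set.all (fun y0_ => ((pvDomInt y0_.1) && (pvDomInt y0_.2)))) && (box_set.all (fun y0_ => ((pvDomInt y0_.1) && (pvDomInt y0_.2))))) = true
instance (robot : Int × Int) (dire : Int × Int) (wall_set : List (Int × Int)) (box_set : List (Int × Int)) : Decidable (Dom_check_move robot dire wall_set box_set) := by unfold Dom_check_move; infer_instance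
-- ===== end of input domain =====

-- B replaces A's recursive box-push check with a bounded index loop computing each cell in
-- closed form robot + i*dire ("alternative" decomposition, same cost); equivalence here is
-- about the RETURN value only — both Pythons perform the same mutation of box_set on success.


-- ===== PORT A =====
-- A's recursion, with a fuel guard (box_set.length + 1 suffices under Pre_: each recursive
-- step consumes a distinct member of box_set; fuel-out returns false, unreachable under Pre_).
def checkA (dire : Int × Int) (wall_set box_set : List (Int × Int)) : Nat → (Int × Int) → Bool
  | 0, _ => false
  | fuel + 1, robot =>
    let px := robot.1 + dire.1
    let py := robot.2 + dire.2
    if (px, py) ∈ wall_set then false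
    else if (px, py) ∈ box_set then
      checkA dire wall_set box_set fuel (px, py)
    else true

def check_move (robot : Int × Int) (dire : Int × Int) (wall_set : List (Int × Int)) (box_set : List (Int × Int)) : Bool :=
  checkA dire wall_set box_set (box_set.length + 1) robot

-- ===== PORT B =====
-- Source B's for-loop over range(1, len+2) with break: scan the index list, computing cell i
-- in closed form; return the cell at which the loop broke (or the last assigned cell).
-- The run-list mutation of Source B affects only box_set, not the return value, and is omitted.
def stopCell (robot dire : Int × Int) (wall_set box_set : List (Int × Int)) : List Int → (Int × Int) → (Int × Int)
  | [], cell => cell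
  | i :: rest, _ =>
    let cell := (robot.1 + i * dire.1, robot.2 + i * dire.2)
    if cell ∈ wall_set ∨ cell ∉ box_set then cell
    else stopCell robot dire wall_set box_set rest cell

def check_move_alt (robot : Int × Int) (dire : Int × Int) (wall_set : List (Int × Int)) (box_set : List (Int × Int)) : Bool :=
  let idxs := PySem.List.pyRange 1 ((box_set.length : Int) + 2) 1
  let cell := stopCell robot dire wall_set box_set idxs (robot.1 + dire.1, robot.2 + dire.2)
  decide (cell ∉ wall_set)

-- ===== PRECONDITION & SPEC =====
-- Pre_ excludes exactly the inputs where Python A never returns: with dire = (0, 0) and the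
-- robot's own cell a box not blocked by a wall, A recurses forever (RecursionError); B's
-- batch shift there would not match a value A never produces.
def Pre_check_move (robot : Int × Int) (dire : Int × Int) (wall_set : List (Int × Int)) (box_set : List (Int × Int)) : Prop :=
  ¬ (dire = (0, 0) ∧ robot ∉ wall_set ∧ robot ∈ box_set)
instance (robot : Int × Int) (dire : Int × Int) (wall_set : List (Int × Int)) (box_set : List (Int × Int)) : Decidable (Pre_check_move robot dire wall_set box_set) := by unfold Pre_check_move; infer_instance

def pvWitness_check_move : (Int × Int) × (Int × Int) × (List (Int × Int)) × (List (Int × Int)) :=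
  ((0, 0), (1, 0), [(3, 0)], [(1, 0), (2, 0)])

def Spec_check_move (robot : Int × Int) (dire : Int × Int) (wall_set : List (Int × Int)) (box_set : List (Int × Int)) (out : Bool) : Prop := out = check_move_alt robot dire wall_set box_set
instance (robot : Int × Int) (dire : Int × Int) (wall_set : List (Int × Int)) (box_set : List (Int × Int)) (out : Bool) : Decidable (Spec_check_move robot dire wall_set box_set out) := by unfold Spec_check_move; infer_instance

-- ===== CLAIM (what is proved, stated in full; the proofs are below) =====
def Claim_equal_check_move : Prop := ∀ (robot : Int × Int) (dire : Int × Int) (wall_set : List (Int × Int)) (box_set : List (Int × Int)), Dom_check_move robot dire wall_set box_set → Pre_check_move robot dire wall_set box_set → Spec_check_move robot dire wall_set box_set (check_move robot dire wall_set box_set)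

-- ===== LEMMAS AND PROOFS =====
-- cell at index i (B's closed form)
def cellAt (robot dire : Int × Int) (i : Int) : Int × Int :=
  (robot.1 + i * dire.1, robot.2 + i * dire.2)

-- The two walks agree as long as some index within fuel ends the run (so neither exhausts).
theorem main_lemma (robot dire : Int × Int) (wall_set box_set : List (Int × Int)) :
    ∀ (n : Nat) (i : Int) (acc : Int × Int),
      (∃ j : Nat, j < n ∧ (cellAt robot dire (i + j) ∈ wall_set ∨ cellAt robot dire (i + j) ∉ box_set)) →
      checkA dire wall_set box_set n (cellAt robot dire (i - 1))
        = decide (stopCell robot dire wall_set box_set (PySem.List.pyRange i (i + n) 1) acc ∉ wall_set) := by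
  intro n
  induction n with
  | zero => intro i acc ⟨j, hj, _⟩; omega
  | succ m ih =>
    intro i acc ⟨j, hj, hgap⟩
    have hlt : i < i + (m + 1 : Nat) := by push_cast; omega
    rw [PySem.List.pyRange_one_cons hlt]
    have hcc : (robot.1 + i * dire.1, robot.2 + i * dire.2) = cellAt robot dire i := rfl
    have hcell : ((cellAt robot dire (i - 1)).1 + dire.1, (cellAt robot dire (i - 1)).2 + dire.2)
        = cellAt robot dire i := by simp [cellAt]; constructor <;> ring
    simp only [checkA, stopCell, hcc, hcell]
    by_cases hw : cellAt robot dire i ∈ wall_set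
    · simp [hw]
    · by_cases hb : cellAt robot dire i ∈ box_set
      · simp only [hw, hb, not_true_eq_false, or_self, if_false, if_true]
        have hi1 : i + ((m + 1 : Nat) : Int) = (i + 1) + (m : Nat) := by push_cast; ring
        rw [hi1]
        have hgap' : ∃ j' : Nat, j' < m ∧
            (cellAt robot dire ((i + 1) + j') ∈ wall_set ∨ cellAt robot dire ((i + 1) + j') ∉ box_set) := by
          rcases j with _ | j'
          · exfalso
            have : cellAt robot dire (i + ((0 : Nat) : Int)) = cellAt robot dire i := by norm_num
            rw [this] at hgap
            rcases hgap with h | h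
            · exact hw h
            · exact h hb
          · refine ⟨j', by omega, ?_⟩
            have : (i + 1) + (j' : Int) = i + ((j' + 1 : Nat) : Int) := by push_cast; ring
            rw [this]; exact hgap
        have := ih (i + 1) (cellAt robot dire i) hgap'
        have hi2 : (i + 1) - 1 = i := by ring
        rw [hi2] at this
        exact this
      · simp [hw, hb]

-- With dire ≠ 0 the cells robot + i*dire (i = 1..len+1) are pairwise distinct, so one of them
-- is not a box; with dire = 0 Pre_ supplies the gap directly.
theorem gap_exists (robot dire : Int × Int) (wall_set box_set : List (Int × Int))
    (hpre : Pre_check_move robot dire wall_set box_set) :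
    ∃ j : Nat, j < box_set.length + 1 ∧
      (cellAt robot dire (1 + j) ∈ wall_set ∨ cellAt robot dire (1 + j) ∉ box_set) := by
  by_cases hd : dire = (0, 0)
  · subst hd
    have hrob : robot ∈ wall_set ∨ robot ∉ box_set := by
      unfold Pre_check_move at hpre; tauto
    refine ⟨0, by omega, ?_⟩
    have : cellAt robot (0, 0) (1 + (0 : Nat)) = robot := by simp [cellAt]
    rw [this]; exact hrob
  · by_contra hno
    push Not at hno
    -- every cell i = 1..len+1 is a box: len+1 distinct elements in a list of length len
    have hinj : Function.Injective (fun k : Nat => cellAt robot dire (1 + k)) := by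
      intro a b hab
      simp only [cellAt, Prod.mk.injEq] at hab
      have h1 : ((a : Int) - b) * dire.1 = 0 := by nlinarith [hab.1]
      have h2 : ((a : Int) - b) * dire.2 = 0 := by nlinarith [hab.2]
      have : dire.1 ≠ 0 ∨ dire.2 ≠ 0 := by
        by_contra h; push Not at h
        exact hd (Prod.ext h.1 h.2)
      have hab0 : (a : Int) - b = 0 := by
        rcases this with h | h
        · exact (mul_eq_zero.mp h1).resolve_right h
        · exact (mul_eq_zero.mp h2).resolve_right h
      omega
    have hsub : (Finset.range (box_set.length + 1)).image (fun k : Nat => cellAt robot dire (1 + k))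
        ⊆ box_set.toFinset := by
      intro x hx
      simp only [Finset.mem_image, Finset.mem_range] at hx
      obtain ⟨k, hk, rfl⟩ := hx
      have := hno k hk
      simp [List.mem_toFinset]
      exact (this.2)
    have hcard : box_set.length + 1 ≤ box_set.toFinset.card := by
      calc box_set.length + 1
          = (Finset.range (box_set.length + 1)).card := (Finset.card_range _).symm
        _ = ((Finset.range (box_set.length + 1)).image (fun k : Nat => cellAt robot dire (1 + k))).card :=
            (Finset.card_image_of_injective _ hinj).symm
        _ ≤ box_set.toFinset.card := Finset.card_le_card hsub
    have := box_set.toFinset_card_le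
    omega

-- ===== VERDICT (by name: the statement is the Claim_ definition above) =====
theorem check_move_spec : Claim_equal_check_move := by
  intro robot dire wall_set box_set _ hpre
  unfold Spec_check_move check_move check_move_alt
  obtain ⟨j, hj, hgap⟩ := gap_exists robot dire wall_set box_set hpre
  have h0 : robot = cellAt robot dire (1 - 1) := by simp [cellAt]
  have hrng : (box_set.length : Int) + 2 = 1 + ((box_set.length + 1 : Nat) : Int) := by
    push_cast; ring
  rw [hrng]
  conv_lhs => rw [h0]
  exact main_lemma robot dire wall_set box_set (box_set.length + 1) 1
    (robot.1 + dire.1, robot.2 + dire.2) ⟨j, hj, hgap⟩
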